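-- pv_equiv track=rewrite | github.com/jasonlotz/python-code-challenges | 225/convert_chars.py | convert_pybites_chars
-- ===== SOURCE A (Python) =====
-- PYBITES = "pybites"
--
-- def convert_pybites_chars(text):
--     """Swap case all characters in the word pybites for the given text.
--        Return the resulting string."""
--
--     # Alternative one liner
--     # return ''.join(c.swapcase() if c.lower() in PYBITES.lower() else c for c in text)
--     result = ''
--
--     for char in text:
--         if char.lower() in PYBITES:
--             result += char.swapcase()
--         else:
--             result += char
--
--     return result
-- ===== SOURCE B (Python) =====
-- def convert_pybites_chars(text):
--     """Swap case all characters in the word pybites for the given text.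
--        Return the resulting string."""
--     table = {ord(c): ord(c.swapcase()) for c in 'pybitesPYBITES'}
--     return text.translate(table)
-- ===== Notes on version B (the rewrite author's own statement) =====
-- stated objective: idiomatic
-- what changed: Replaces the per-character branch-and-concatenate loop (substring membership test and swapcase per hit) by a precomputed 14-entry translation table applied in one str.translate pass.
import Mathlib
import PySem

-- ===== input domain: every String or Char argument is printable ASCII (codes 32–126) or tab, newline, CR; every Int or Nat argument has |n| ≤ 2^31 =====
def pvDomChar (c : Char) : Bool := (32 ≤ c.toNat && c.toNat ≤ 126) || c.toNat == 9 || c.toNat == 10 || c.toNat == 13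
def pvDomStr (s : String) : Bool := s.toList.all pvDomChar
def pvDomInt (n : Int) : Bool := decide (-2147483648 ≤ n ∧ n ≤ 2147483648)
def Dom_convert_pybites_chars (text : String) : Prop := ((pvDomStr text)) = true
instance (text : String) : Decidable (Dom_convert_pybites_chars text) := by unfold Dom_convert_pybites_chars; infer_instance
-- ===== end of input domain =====

-- B replaces A's per-character branch-and-concatenate loop by a precomputed 14-entry
-- translation table and a single translate pass (idiomatic; same return value).

-- shared library-call port: Python's str.swapcase() on a single character
-- (hand port, exact on the ASCII domain: lower → upper, upper → lower, else unchanged)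
def pySwapcaseChar (c : Char) : Char :=
  if PySem.Chars.islower c then PySem.Chars.upperChar c
  else if PySem.Chars.isupper c then PySem.Chars.lowerChar c
  else c

-- ===== PORT A =====
def PYBITES : String := "pybites"

def convert_pybites_chars (text : String) : String :=
  -- result = ''; for char in text: result += (char.swapcase() if char.lower() in PYBITES else char)
  String.ofList (text.toList.foldl
    (fun result char =>
      if PySem.Chars.isIn (PySem.Chars.lower [char]) PYBITES.toList then
        result ++ [pySwapcaseChar char]
      else
        result ++ [char])
    [])

-- ===== PORT B =====
def convert_pybites_chars_alt (text : String) : String :=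
  -- table = {ord(c): ord(c.swapcase()) for c in 'pybitesPYBITES'}; return text.translate(table)
  let table : PySem.Dict Char Char :=
    "pybitesPYBITES".toList.foldl (fun d c => d.insert c (pySwapcaseChar c)) PySem.Dict.empty
  String.ofList (text.toList.map (fun c => (table.get? c).getD c))

-- ===== PRECONDITION & SPEC =====
def Spec_convert_pybites_chars (text : String) (out : String) : Prop := out = convert_pybites_chars_alt text
instance (text : String) (out : String) : Decidable (Spec_convert_pybites_chars text out) := by unfold Spec_convert_pybites_chars; infer_instance

-- ===== CLAIM (what is proved, stated in full; the proofs are below) =====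
def Claim_equal_convert_pybites_chars : Prop := ∀ (text : String), Dom_convert_pybites_chars text → Spec_convert_pybites_chars text (convert_pybites_chars text)

-- ===== LEMMAS AND PROOFS =====

-- A's per-character result
def pvStepA (c : Char) : Char :=
  if PySem.Chars.isIn (PySem.Chars.lower [c]) PYBITES.toList then pySwapcaseChar c else c

-- B's per-character result
def pvStepB (c : Char) : Char :=
  (("pybitesPYBITES".toList.foldl (fun d c => d.insert c (pySwapcaseChar c))
      PySem.Dict.empty).get? c).getD c

-- the two per-character results agree on all ASCII characters (enumeration)
set_option maxRecDepth 10000 in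
theorem pvStep_eq (c : Char) (h : c.toNat < 128) : pvStepA c = pvStepB c := by
  have key : ∀ n : Fin 128, pvStepA (Char.ofNat n.val) = pvStepB (Char.ofNat n.val) := by decide
  simpa [Char.ofNat_toNat] using key ⟨c.toNat, h⟩

-- ===== VERDICT (by name: the statement is the Claim_ definition above) =====
theorem convert_pybites_chars_spec : Claim_equal_convert_pybites_chars := by
  intro text hdom
  unfold Spec_convert_pybites_chars convert_pybites_chars convert_pybites_chars_alt
  have hA : (fun (result : List Char) char =>
      if PySem.Chars.isIn (PySem.Chars.lower [char]) PYBITES.toList then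
        result ++ [pySwapcaseChar char]
      else result ++ [char]) = (fun result char => result ++ [pvStepA char]) := by
    funext r c; unfold pvStepA; split <;> rfl
  rw [hA, PySem.List.foldl_append_singleton_eq_map]
  have hdom' : ∀ c ∈ text.toList, pvDomChar c = true := by
    simpa [Dom_convert_pybites_chars, pvDomStr, List.all_eq_true] using hdom
  congr 1
  apply List.map_congr_left
  intro c hc
  have h128 : c.toNat < 128 := by
    have := hdom' c hc
    simp [pvDomChar] at this
    omega
  simpa [pvStepB] using pvStep_eq c h128
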